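-- pv_equiv track=rewrite | github.com/kiyo7447/Python-Logic | TheHousekeeperAndTheProfessor/Smith.py | enumerate_smith_numbers
-- ===== SOURCE A (Python) =====
-- def is_smith_number(n):
--     """
--     Return True if n is a Smith number, False otherwise.
--     """
--     # Find the prime factors of n
--     factors = []
--     n1 = n
--     d = 2
--     while d * d <= n1:
--         while (n1 % d) == 0:
--             factors.append(d)
--             n1 //= d
--         d += 1
--     if n1 > 1:
--         factors.append(n1)
--
--     # Return False if n is a prime number
--     if len(factors) == 1:
--         return False
--
--     # Calculate the sum of the digits of the prime factors
--     digit_sum = 0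
--     for factor in factors:
--         for digit in str(factor):
--             digit_sum += int(digit)
--
--     # Calculate the sum of the digits of n
--     n_digit_sum = 0
--     for digit in str(n):
--         n_digit_sum += int(digit)
--
--     # Return True if the digit sums are equal, False otherwise
--     return digit_sum == n_digit_sum
--
-- def enumerate_smith_numbers(limit):
--     """
--     Enumerate all Smith numbers up to the given limit.
--     """
--     smith_numbers = []
--     n = 4
--     while len(smith_numbers) < limit:
--         if is_smith_number(n):
--             smith_numbers.append(n)
--         n += 1
--     return smith_numbers
-- ===== SOURCE B (Python) =====
-- def _ds(m):
--     # digit sum by arithmetic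
--     return 0 if m <= 0 else m % 10 + _ds(m // 10)
--
-- def _build_spf(size):
--     # spf[j] = smallest prime factor of j (for 2 <= j < size):
--     # mark multiples of each i ascending; the first i that claims j is its
--     # smallest divisor >= 2, which is automatically prime
--     spf = [0] * size
--     for i in range(2, size):
--         if spf[i] == 0:
--             for j in range(i, size, i):
--                 if spf[j] == 0:
--                     spf[j] = i
--     return spf
--
-- def enumerate_smith_numbers(limit):
--     out = []
--     n = 4
--     size = 64
--     spf = _build_spf(size)
--     while len(out) < limit:
--         if n >= size:
--             size *= 2
--             spf = _build_spf(size)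
--         m, cnt, fsum = n, 0, 0
--         while m > 1:
--             p = spf[m]
--             cnt += 1
--             fsum += _ds(p)
--             m //= p
--         if cnt > 1 and fsum == _ds(n):
--             out.append(n)
--         n += 1
--     return out
-- ===== Notes on version B (the rewrite author's own statement) =====
-- stated objective: faster
-- what changed: B replaces A's per-number trial-division factorization by a smallest-prime-factor sieve array (rebuilt with doubling size as candidates grow), so each candidate's prime factorization is read off in O(log n) table lookups, and computes digit sums arithmetically instead of via str(); a timing run measured B 2.3-3.4x faster, and B still answered where A timed out.
import Mathlib
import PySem

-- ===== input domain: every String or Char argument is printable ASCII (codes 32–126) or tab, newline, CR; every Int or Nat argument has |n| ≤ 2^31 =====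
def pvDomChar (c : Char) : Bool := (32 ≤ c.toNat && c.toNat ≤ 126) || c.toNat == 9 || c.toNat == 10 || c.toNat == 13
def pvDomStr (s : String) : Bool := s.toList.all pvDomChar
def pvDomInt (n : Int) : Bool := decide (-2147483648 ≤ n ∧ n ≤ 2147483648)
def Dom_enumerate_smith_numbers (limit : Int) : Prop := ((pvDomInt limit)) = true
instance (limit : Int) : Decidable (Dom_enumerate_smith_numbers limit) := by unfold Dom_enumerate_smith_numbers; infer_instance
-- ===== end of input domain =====

-- B replaces A's per-number trial-division factorization by a smallest-prime-factor sieve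
-- (rebuilt with doubling size), reading each candidate's factorization off the sieve, with
-- arithmetic digit sums instead of string conversion (faster: a timing run measured
-- B 2.3-3.4x faster on its generated inputs, B still answering where A timed out).
-- Both search loops are ported with a generous fuel bound as a totality guard (the same
-- bound on both sides).

-- termination measure fact for the divide-loops (kept as a named lemma so the
-- recursive definitions embed only a small proof term)
theorem pv_fdiv_toNat_lt (m d : Int) (hm : 0 < m) (hd : 2 ≤ d) :
    (PySem.Int.floordiv m d).toNat < m.toNat := by
  have hd0 : (0:Int) < d := Int.lt_of_lt_of_le (by decide) hd
  have hmul : m < m * d := by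
    have h1 : m * 1 < m * d := Int.mul_lt_mul_of_pos_left (Int.lt_of_lt_of_le (by decide) hd) hm
    rwa [Int.mul_one] at h1
  rw [PySem.Int.floordiv_eq_ediv_of_pos hd0]
  exact (Int.toNat_lt_toNat hm).mpr (Int.ediv_lt_of_lt_mul hd0 hmul)

-- ===== PORT A =====

-- inner `while n1 % d == 0: factors.append(d); n1 //= d` ; returns (final n1, appended factors)
-- the `2 ≤ d ∧ 0 < n1` conjuncts are totality guards only (always true where A runs this loop)
def aDivideOut (d n1 : Int) : Int × List Int :=
  if h : 2 ≤ d ∧ 0 < n1 ∧ PySem.Int.mod n1 d = 0 then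
    ((aDivideOut d (PySem.Int.floordiv n1 d)).1, d :: (aDivideOut d (PySem.Int.floordiv n1 d)).2)
  else (n1, [])
termination_by n1.toNat
decreasing_by exact pv_fdiv_toNat_lt n1 d h.2.1 h.1

theorem aDivideOut_le (d n1 : Int) : 2 ≤ d → 0 < n1 →
    0 < (aDivideOut d n1).1 ∧ (aDivideOut d n1).1 ≤ n1 := by
  fun_induction aDivideOut d n1 with
  | case1 n1 h ih =>
    intro _ _
    have hd0 : (0:Int) < d := Int.lt_of_lt_of_le (by decide) h.1
    have heq : PySem.Int.floordiv n1 d = n1 / d := PySem.Int.floordiv_eq_ediv_of_pos hd0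
    have hq0 : 0 < PySem.Int.floordiv n1 d := heq ▸
      Int.ediv_pos_of_pos_of_dvd h.2.1 (Int.le_of_lt hd0) ((PySem.Int.mod_eq_zero_iff_dvd n1 d).1 h.2.2)
    have hqle : PySem.Int.floordiv n1 d ≤ n1 := heq ▸ Int.ediv_le_self d (Int.le_of_lt h.2.1)
    have := ih h.1 hq0
    exact ⟨this.1, Int.le_trans this.2 hqle⟩
  | case2 n1 h => intro _ hn; exact ⟨hn, Int.le_refl _⟩

-- termination measure fact for A's outer sweep (cited by name in decreasing_by)
theorem pv_aOuter_dec (d n1 : Int) (h1 : 2 ≤ d) (h2 : d * d ≤ n1) :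
    ((aDivideOut d n1).1 + 1 - (d + 1)).toNat < (n1 + 1 - d).toNat := by
  have hd0 : (0:Int) < d := Int.lt_of_lt_of_le (by decide) h1
  have hn : 0 < n1 := Int.lt_of_lt_of_le (Int.mul_pos hd0 hd0) h2
  have hb := aDivideOut_le d n1 h1 hn
  have hdn : d ≤ n1 := by
    have hdd : d * 1 ≤ d * d :=
      Int.mul_le_mul_of_nonneg_left (Int.le_trans (by decide) h1) (Int.le_of_lt hd0)
    rw [Int.mul_one] at hdd
    exact Int.le_trans hdd h2
  have hpos : (0:Int) < n1 + 1 - d := Int.sub_pos.mpr (Int.lt_add_one_of_le hdn)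
  have hlt : (aDivideOut d n1).1 + 1 - (d + 1) < n1 + 1 - d := by
    rw [Int.add_sub_add_right]
    exact Int.sub_lt_sub_right (Int.lt_add_one_of_le hb.2) d
  exact (Int.toNat_lt_toNat hpos).mpr hlt

-- outer `while d * d <= n1: … ; d += 1` ; the `2 ≤ d` conjunct is a totality guard only
def aOuter (n1 d : Int) : Int × List Int :=
  if h : 2 ≤ d ∧ d * d ≤ n1 then
    ((aOuter (aDivideOut d n1).1 (d + 1)).1,
      (aDivideOut d n1).2 ++ (aOuter (aDivideOut d n1).1 (d + 1)).2)
  else (n1, [])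
termination_by (n1 + 1 - d).toNat
decreasing_by exact pv_aOuter_dec d n1 h.1 h.2

-- `for digit in str(x): s += int(digit)` (digit is a one-char string; int('c') via ofChars?)
def aDigitStep (s : Int) (cs : List Char) : Int :=
  cs.foldl (fun a c => a + ((PySem.Int.ofChars? [c]).getD 0)) s

def is_smith_number (n : Int) : Bool :=
  let r := aOuter n 2
  let factors := if 1 < r.1 then r.2 ++ [r.1] else r.2
  if factors.length == 1 then false
  else
    let dsum := factors.foldl (fun a f => aDigitStep a (PySem.Int.toChars f)) 0
    let nsum := aDigitStep 0 (PySem.Int.toChars n)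
    dsum == nsum

def aLoop (limit : Int) : Nat → Int → List Int → List Int
  | 0, _, acc => acc
  | f + 1, n, acc =>
      if (acc.length : Int) < limit then
        aLoop limit f (n + 1) (if is_smith_number n then acc ++ [n] else acc)
      else acc

def enumerate_smith_numbers (limit : Int) : List Int :=
  aLoop limit ((limit.toNat + 1) * 10000) 4 []

-- ===== PORT B =====

-- small constant fact bDS's termination proof cites by name
theorem pv_two_le_ten : (2:Int) ≤ 10 := by decide

-- _ds: arithmetic digit sum
def bDS (m : Int) : Int :=
  if h : 0 < m then PySem.Int.mod m 10 + bDS (PySem.Int.floordiv m 10) else 0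
termination_by m.toNat
decreasing_by exact pv_fdiv_toNat_lt m 10 h pv_two_le_ten

-- the Python list spf is held as an Array Int; spf[i] read/write via getD/setIfInBounds:
-- exact here since every access B makes has 0 ≤ i < len(spf)
def spfGet (a : Array Int) (i : Int) : Int := a.getD i.toNat 0
def spfSet (a : Array Int) (i v : Int) : Array Int := a.setIfInBounds i.toNat v

-- `for j in range(i, size, i): if spf[j] == 0: spf[j] = i`
def markMultiples (i size : Int) (spf : Array Int) : Array Int :=
  (PySem.List.pyRange i size i).foldl
    (fun s j => if spfGet s j == 0 then spfSet s j i else s) spf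

-- _build_spf: spf = [0]*size; for i in range(2, size): if spf[i]==0: mark multiples of i
def buildSpf (size : Int) : Array Int :=
  (PySem.List.pyRange 2 size 1).foldl
    (fun s i => if spfGet s i == 0 then markMultiples i size s else s)
    (Array.replicate size.toNat 0)

-- `while m > 1: p = spf[m]; cnt += 1; fsum += _ds(p); m //= p`
-- the `2 ≤ spf[m]` conjunct is a totality guard only (always true where B runs this loop)
def bFactor (spf : Array Int) (m cnt fsum : Int) : Int × Int :=
  if h : 1 < m ∧ 2 ≤ spfGet spf m then
    bFactor spf (PySem.Int.floordiv m (spfGet spf m)) (cnt + 1)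
      (fsum + bDS (spfGet spf m))
  else (cnt, fsum)
termination_by m.toNat
decreasing_by exact pv_fdiv_toNat_lt m _ (by omega) h.2

def bLoop (limit : Int) : Nat → Int → Int → Array Int → List Int → List Int
  | 0, _, _, _, acc => acc
  | f + 1, n, size, spf, acc =>
      if (acc.length : Int) < limit then
        let size' := if size ≤ n then size * 2 else size
        let spf' := if size ≤ n then buildSpf size' else spf
        let r := bFactor spf' n 0 0
        bLoop limit f (n + 1) size' spf'
          (if decide (1 < r.1) && (r.2 == bDS n) then acc ++ [n] else acc)
      else acc

def enumerate_smith_numbers_alt (limit : Int) : List Int :=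
  bLoop limit ((limit.toNat + 1) * 10000) 4 64 (buildSpf 64) []

-- ===== PRECONDITION & SPEC =====
def Spec_enumerate_smith_numbers (limit : Int) (out : List Int) : Prop := out = enumerate_smith_numbers_alt limit
instance (limit : Int) (out : List Int) : Decidable (Spec_enumerate_smith_numbers limit out) := by unfold Spec_enumerate_smith_numbers; infer_instance

-- ===== CLAIM (what is proved, stated in full; the proofs are below) =====
def Claim_equal_enumerate_smith_numbers : Prop := ∀ (limit : Int), Dom_enumerate_smith_numbers limit → Spec_enumerate_smith_numbers limit (enumerate_smith_numbers limit)

-- ===== LEMMAS AND PROOFS =====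

-- digit value of a character, and digit-char-sum of a char list (proof-side helpers)
def charVal (c : Char) : Int := (PySem.Int.ofChars? [c]).getD 0
def csum (cs : List Char) : Int := (cs.map charVal).sum

-- arithmetic digit sum on Nat (reference form both sides are reduced to)
def natDS (n : Nat) : Int :=
  if n = 0 then 0 else ((n % 10 : Nat) : Int) + natDS (n / 10)
decreasing_by exact Nat.div_lt_self (Nat.pos_of_ne_zero (by assumption)) (by omega)

theorem charVal_digitChar (d : Nat) (hd : d < 10) : charVal (Nat.digitChar d) = (d : Int) := by
  interval_cases d <;> decide

theorem csum_toDigitsCore (fuel : Nat) : ∀ (n : Nat) (ds : List Char), n < fuel →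
    csum (Nat.toDigitsCore 10 fuel n ds) = natDS n + csum ds := by
  induction fuel with
  | zero => intro n ds h; omega
  | succ fuel ih =>
    intro n ds h
    rw [Nat.toDigitsCore]
    have h10 : n % 10 < 10 := Nat.mod_lt _ (by omega)
    by_cases hz : n / 10 = 0
    · rw [if_pos hz]
      have hds : natDS n = ((n % 10 : Nat) : Int) := by
        by_cases h0 : n = 0
        · subst h0; rw [natDS]; norm_num
        · rw [natDS, if_neg h0, hz, natDS]; norm_num
      simp only [csum, List.map_cons, List.sum_cons]
      rw [charVal_digitChar _ h10, hds]
    · rw [if_neg hz]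
      have hn0 : n ≠ 0 := by omega
      have hlt : n / 10 < fuel := by omega
      rw [ih _ _ hlt]
      conv_rhs => rw [natDS]
      rw [if_neg hn0]
      simp only [csum, List.map_cons, List.sum_cons, charVal_digitChar _ h10]
      ring

theorem csum_toChars (m : Int) (hm : 0 ≤ m) : csum (PySem.Int.toChars m) = natDS m.toNat := by
  have : ¬ m < 0 := by omega
  rw [PySem.Int.toChars, if_neg this]
  rw [Nat.toDigits, csum_toDigitsCore _ _ _ (by omega)]
  simp [csum]

theorem bDS_eq_natDS (m : Int) : 0 ≤ m → bDS m = natDS m.toNat := by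
  fun_induction bDS m with
  | case1 m h ih =>
    intro _
    obtain ⟨k, rfl⟩ : ∃ k : Nat, m = (k : Int) := ⟨m.toNat, by omega⟩
    have e1 : PySem.Int.floordiv (k:Int) 10 = ((k / 10 : Nat) : Int) := by
      rw [PySem.Int.floordiv_eq_ediv_of_pos (by omega)]; omega
    have e2 : PySem.Int.mod (k:Int) 10 = ((k % 10 : Nat) : Int) := by
      rw [PySem.Int.mod_eq_emod_of_pos (by omega)]; omega
    rw [e1] at ih
    rw [e1, e2, ih (by omega)]
    conv_rhs => rw [natDS]
    have hk : ¬ (k:Int).toNat = 0 := by omega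
    rw [if_neg hk]
    have t1 : ((k:Int)).toNat = k := by omega
    have t2 : (((k / 10 : Nat)):Int).toNat = k / 10 := by omega
    rw [t1, t2]
  | case2 m h => intro _; rw [natDS]; simp [show m.toNat = 0 by omega]

def listDS (l : List Int) : Int := (l.map bDS).sum

-- digit sum of a Nat prime list via bDS (the common reference value)
def natListDS (l : List Nat) : Int := (l.map (fun p : Nat => bDS (p : Int))).sum

theorem aDigitStep_eq (s : Int) (cs : List Char) : aDigitStep s cs = s + csum cs := by
  unfold aDigitStep csum charVal
  exact PySem.List.foldl_add cs _ s

-- A's factor digit-sum fold equals the arithmetic digit sum of the list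
theorem afold_eq (l : List Int) : ∀ (s : Int), (∀ x ∈ l, 0 ≤ x) →
    l.foldl (fun a f => aDigitStep a (PySem.Int.toChars f)) s = s + listDS l := by
  induction l with
  | nil => intro s _; simp [listDS]
  | cons x t ih =>
    intro s hx
    simp only [List.foldl_cons]
    rw [ih _ (fun y hy => hx y (by simp [hy])), aDigitStep_eq,
        csum_toChars x (hx x (by simp)), ← bDS_eq_natDS x (hx x (by simp))]
    simp only [listDS, List.map_cons, List.sum_cons]
    ring

-- ===== A-side: the trial-division sweep produces a prime factorization =====

theorem aDivideOut_facts (d n1 : Int) : 2 ≤ d → 0 < n1 →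
    0 < (aDivideOut d n1).1 ∧
    (aDivideOut d n1).1 * (aDivideOut d n1).2.prod = n1 ∧
    ¬ d ∣ (aDivideOut d n1).1 ∧
    (∀ x ∈ (aDivideOut d n1).2, x = d) := by
  fun_induction aDivideOut d n1 with
  | case1 n1 h ih =>
    intro hd hn
    have hd0 : (0:Int) < d := by omega
    have hdvd : d ∣ n1 := (PySem.Int.mod_eq_zero_iff_dvd n1 d).1 h.2.2
    have heq : PySem.Int.floordiv n1 d = n1 / d := PySem.Int.floordiv_eq_ediv_of_pos hd0
    have hq0 : 0 < PySem.Int.floordiv n1 d := heq ▸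
      Int.ediv_pos_of_pos_of_dvd h.2.1 (Int.le_of_lt hd0) hdvd
    obtain ⟨i1, i2, i3, i4⟩ := ih hd hq0
    refine ⟨i1, ?_, i3, ?_⟩
    · simp only [List.prod_cons]
      calc (aDivideOut d (PySem.Int.floordiv n1 d)).1 *
            (d * (aDivideOut d (PySem.Int.floordiv n1 d)).2.prod)
          = d * ((aDivideOut d (PySem.Int.floordiv n1 d)).1 *
            (aDivideOut d (PySem.Int.floordiv n1 d)).2.prod) := by ring
        _ = d * (n1 / d) := by rw [← heq, i2]
        _ = n1 := Int.mul_ediv_cancel' hdvd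
    · intro x hx
      simp only [List.mem_cons] at hx
      rcases hx with rfl | hx
      · rfl
      · exact i4 x hx
  | case2 n1 h =>
    intro hd hn
    have : ¬ PySem.Int.mod n1 d = 0 := by tauto
    refine ⟨hn, by simp, fun hc => this ((PySem.Int.mod_eq_zero_iff_dvd n1 d).2 hc), by simp⟩

theorem aOuter_facts (n1 d : Int) : 2 ≤ d → 0 < n1 →
    (∀ e : Int, 2 ≤ e → e < d → ¬ e ∣ n1) →
    0 < (aOuter n1 d).1 ∧
    (aOuter n1 d).1 * (aOuter n1 d).2.prod = n1 ∧
    (∀ x ∈ (aOuter n1 d).2, 2 ≤ x ∧ Nat.Prime x.toNat) ∧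
    (1 < (aOuter n1 d).1 → Nat.Prime (aOuter n1 d).1.toNat) := by
  fun_induction aOuter n1 d with
  | case1 n1 d h ih =>
    intro hd hn hnd
    obtain ⟨q0, qprod, qnd, qall⟩ := aDivideOut_facts d n1 hd hn
    have hqdvd : (aDivideOut d n1).1 ∣ n1 := ⟨(aDivideOut d n1).2.prod, qprod.symm⟩
    have hnd' : ∀ e : Int, 2 ≤ e → e < d + 1 → ¬ e ∣ (aDivideOut d n1).1 := by
      intro e he hlt hdvd
      rcases lt_or_eq_of_le (show e ≤ d by omega) with hcase | hcase
      · exact hnd e he hcase (dvd_trans hdvd hqdvd)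
      · exact qnd (hcase ▸ hdvd)
    obtain ⟨i1, i2, i3, i4⟩ := ih (by omega) q0 hnd'
    refine ⟨i1, ?_, ?_, i4⟩
    · simp only [List.prod_append]
      calc (aOuter (aDivideOut d n1).1 (d + 1)).1 *
            ((aDivideOut d n1).2.prod * (aOuter (aDivideOut d n1).1 (d + 1)).2.prod)
          = (aDivideOut d n1).2.prod *
            ((aOuter (aDivideOut d n1).1 (d + 1)).1 *
              (aOuter (aDivideOut d n1).1 (d + 1)).2.prod) := by ring
        _ = (aDivideOut d n1).2.prod * (aDivideOut d n1).1 := by rw [i2]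
        _ = n1 := by rw [mul_comm]; exact qprod
    · intro x hx
      rw [List.mem_append] at hx
      rcases hx with hx | hx
      · have hxd : x = d := qall x hx
        subst hxd
        refine ⟨hd, ?_⟩
        have hddvd : x ∣ n1 := by
          have h1 : x ∣ (aDivideOut x n1).2.prod := List.dvd_prod hx
          exact dvd_trans h1 ⟨(aDivideOut x n1).1, by rw [mul_comm]; exact qprod.symm⟩
        have hne1 : x.toNat ≠ 1 := by omega
        have hp := Nat.minFac_prime hne1
        have hple : x.toNat.minFac ≤ x.toNat := Nat.minFac_le (by omega)
        have hpdvdx : (x.toNat.minFac : Int) ∣ x := by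
          have := Nat.minFac_dvd x.toNat
          have h2 : ((x.toNat.minFac : Nat) : Int) ∣ ((x.toNat : Nat) : Int) :=
            Int.natCast_dvd_natCast.mpr this
          rwa [Int.toNat_of_nonneg (by omega)] at h2
        have hnot : ¬ ((x.toNat.minFac : Int) < x) := by
          intro hlt
          exact hnd _ (by exact_mod_cast hp.two_le) hlt (dvd_trans hpdvdx hddvd)
        have hpe : x.toNat.minFac = x.toNat := by omega
        rwa [← hpe]
      · exact i3 x hx
  | case2 n1 d h =>
    intro hd hn hnd
    have hlt : n1 < d * d := by
      by_contra hc
      exact h ⟨hd, by omega⟩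
    refine ⟨hn, by simp, by simp, ?_⟩
    intro h1
    by_contra hnp
    have hne1 : n1.toNat ≠ 1 := by omega
    have hp := Nat.minFac_prime hne1
    have hpdvd : (n1.toNat.minFac : Int) ∣ n1 := by
      have := Nat.minFac_dvd n1.toNat
      have h2 : ((n1.toNat.minFac : Nat) : Int) ∣ ((n1.toNat : Nat) : Int) :=
        Int.natCast_dvd_natCast.mpr this
      rwa [Int.toNat_of_nonneg (by omega)] at h2
    have hdle : d ≤ (n1.toNat.minFac : Int) := by
      by_contra hc
      exact hnd _ (by exact_mod_cast hp.two_le) (by omega) hpdvd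
    have hsq := Nat.minFac_sq_le_self (show 0 < n1.toNat by omega) hnp
    have hsq2 : n1.toNat.minFac * n1.toNat.minFac ≤ n1.toNat := by nlinarith [hsq]
    have hsq' : (n1.toNat.minFac : Int) * (n1.toNat.minFac : Int) ≤ n1 := by
      have h5 : ((n1.toNat.minFac * n1.toNat.minFac : Nat) : Int) ≤ ((n1.toNat : Nat) : Int) := by
        exact_mod_cast hsq2
      push_cast at h5
      rwa [Int.toNat_of_nonneg (by omega)] at h5
    nlinarith [hdle, hlt, hsq', hd]

-- casting a list of nonneg ints down to Nat and back
theorem map_toNat_cast (l : List Int) (h : ∀ x ∈ l, 0 ≤ x) :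
    (l.map Int.toNat).map (Nat.cast : Nat → Int) = l := by
  induction l with
  | nil => rfl
  | cons x t ih =>
    simp only [List.map_cons]
    rw [Int.toNat_of_nonneg (h x (by simp)), ih (fun y hy => h y (by simp [hy]))]

theorem listDS_eq_natListDS (l : List Int) (h : ∀ x ∈ l, 0 ≤ x) :
    listDS l = natListDS (l.map Int.toNat) := by
  induction l with
  | nil => rfl
  | cons x t ih =>
    simp only [listDS, natListDS, List.map_cons, List.sum_cons] at *
    rw [Int.toNat_of_nonneg (h x (by simp)), ih (fun y hy => h y (by simp [hy]))]

-- ===== B-side: the sieve holds smallest prime factors =====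

theorem arrGetD_eq (a : Array Int) (i : Nat) (d : Int) (h : i < a.size) :
    a.getD i d = a[i] := by
  simp [Array.getD, h]

-- per-index characterization of the inner marking fold over any index list
theorem markFold_getD (i : Int) (hi : 2 ≤ i) :
    ∀ (L : List Int) (s : Array Int), (∀ x ∈ L, 0 ≤ x ∧ x < (s.size : Int)) →
    (L.foldl (fun s j => if spfGet s j == 0 then spfSet s j i else s) s).size = s.size ∧
    ∀ j : Nat, j < s.size →
      (L.foldl (fun s j => if spfGet s j == 0 then spfSet s j i else s) s).getD j 0 =
        if (j : Int) ∈ L ∧ s.getD j 0 = 0 then i else s.getD j 0 := by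
  intro L
  induction L with
  | nil => intro s _; simp
  | cons a t ih =>
    intro s hb
    have ha := hb a (by simp)
    have halen : a.toNat < s.size := by omega
    have hget : spfGet s a = s.getD a.toNat 0 := rfl
    simp only [List.foldl_cons]
    by_cases hz : s.getD a.toNat 0 = 0
    · have hcond : (spfGet s a == 0) = true := by rw [hget, hz]; rfl
      rw [hcond, if_pos rfl]
      have hlen' : (spfSet s a i).size = s.size := Array.size_setIfInBounds
      obtain ⟨l1, l2⟩ := ih (spfSet s a i) (by intro x hx; have := hb x (by simp [hx]); omega)
      constructor
      · rw [l1, hlen']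
      · intro j hj
        rw [l2 j (by omega)]
        by_cases hja : (j : Int) = a
        · have hja' : j = a.toNat := by omega
          subst hja'
          have hset : (spfSet s a i).getD a.toNat 0 = i := by
            show (s.setIfInBounds a.toNat i).getD a.toNat 0 = i
            rw [arrGetD_eq _ _ _ (by rw [Array.size_setIfInBounds]; omega),
              Array.getElem_setIfInBounds_self (by rw [Array.size_setIfInBounds]; omega)]
          rw [hset]
          rw [if_neg (by rintro ⟨h1, h2⟩; omega)]
          rw [if_pos ⟨by rw [Int.toNat_of_nonneg ha.1]; simp, hz⟩]
        · have hja' : j ≠ a.toNat := by omega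
          have hset : (spfSet s a i).getD j 0 = s.getD j 0 := by
            show (s.setIfInBounds a.toNat i).getD j 0 = s.getD j 0
            rw [arrGetD_eq _ _ _ (by rw [Array.size_setIfInBounds]; omega), arrGetD_eq _ _ _ hj,
              Array.getElem_setIfInBounds_ne hj (by omega)]
          rw [hset]
          by_cases hmt : (j:Int) ∈ t ∧ s.getD j 0 = 0
          · rw [if_pos hmt, if_pos ⟨by simp [hmt.1], hmt.2⟩]
          · rw [if_neg hmt, if_neg (by rintro ⟨h1, h2⟩; exact hmt ⟨by
              rcases List.mem_cons.mp h1 with hc | hc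
              · exact absurd hc hja
              · exact hc, h2⟩)]
    · have hcond : (spfGet s a == 0) = false := by
        rw [hget]; simpa using hz
      rw [hcond]
      simp only [Bool.false_eq_true, if_false]
      obtain ⟨l1, l2⟩ := ih s (fun x hx => hb x (by simp [hx]))
      refine ⟨l1, ?_⟩
      intro j hj
      rw [l2 j hj]
      by_cases hja : (j : Int) = a
      · have hja' : j = a.toNat := by omega
        subst hja'
        rw [if_neg (by rintro ⟨_, h2⟩; exact hz h2), if_neg (by rintro ⟨_, h2⟩; exact hz h2)]
      · by_cases hmt : (j:Int) ∈ t ∧ s.getD j 0 = 0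
        · rw [if_pos hmt, if_pos ⟨by simp [hmt.1], hmt.2⟩]
        · rw [if_neg hmt, if_neg (by rintro ⟨h1, h2⟩; exact hmt ⟨by
            rcases List.mem_cons.mp h1 with hc | hc
            · exact absurd hc hja
            · exact hc, h2⟩)]

theorem markMultiples_getD (i size : Int) (s : Array Int) (hi : 2 ≤ i)
    (hs : s.size = size.toNat) :
    (markMultiples i size s).size = s.size ∧
    ∀ j : Nat, j < s.size →
      (markMultiples i size s).getD j 0 =
        if i ∣ (j:Int) ∧ i ≤ (j:Int) ∧ s.getD j 0 = 0 then i else s.getD j 0 := by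
  have hbounds : ∀ x ∈ PySem.List.pyRange i size i, 0 ≤ x ∧ x < (s.size : Int) := by
    intro x hx
    rw [PySem.List.mem_pyRange_iff_of_pos (by omega)] at hx
    have hsize : (0:Int) ≤ size := by omega
    have : ((size.toNat : Nat) : Int) = size := Int.toNat_of_nonneg hsize
    constructor
    · omega
    · rw [hs]; omega
  obtain ⟨l1, l2⟩ := markFold_getD i hi (PySem.List.pyRange i size i) s hbounds
  refine ⟨l1, ?_⟩
  intro j hj
  rw [markMultiples, l2 j hj]
  have hjsize : (j : Int) < size := by
    have : ((size.toNat : Nat) : Int) = size ∨ size ≤ 0 := by omega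
    rcases this with hc | hc
    · omega
    · omega
  have hmem : (j:Int) ∈ PySem.List.pyRange i size i ↔ i ∣ (j:Int) ∧ i ≤ (j:Int) := by
    rw [PySem.List.mem_pyRange_iff_of_pos (by omega)]
    constructor
    · rintro ⟨h1, h2, h3⟩
      refine ⟨?_, h1⟩
      have := dvd_add h3 (dvd_refl i)
      simpa using this
    · rintro ⟨h1, h2⟩
      exact ⟨h2, hjsize, dvd_sub h1 (dvd_refl i)⟩
  by_cases hc : i ∣ (j:Int) ∧ i ≤ (j:Int) ∧ s.getD j 0 = 0
  · rw [if_pos ⟨hmem.mpr ⟨hc.1, hc.2.1⟩, hc.2.2⟩, if_pos hc]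
  · rw [if_neg (by rintro ⟨h1, h2⟩; exact hc ⟨(hmem.mp h1).1, (hmem.mp h1).2, h2⟩), if_neg hc]

-- main sieve invariant: after processing all i' < i, each cell holds its minFac iff minFac < i
theorem buildAux (size : Int) :
    ∀ (k : Nat) (i : Int) (s : Array Int), (size - i).toNat = k → 2 ≤ i →
    s.size = size.toNat →
    (∀ j : Nat, 2 ≤ j → j < s.size →
      s.getD j 0 = if ((j:Nat).minFac : Int) < i then ((j:Nat).minFac : Int) else 0) →
    ∀ j : Nat, 2 ≤ j → j < s.size →
      ((PySem.List.pyRange i size 1).foldl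
        (fun s i => if spfGet s i == 0 then markMultiples i size s else s)
        s).getD j 0 = ((j:Nat).minFac : Int) := by
  intro k
  induction k with
  | zero =>
    intro i s hk hi hlen hinv j hj2 hjlen
    have hle : size ≤ i := by omega
    rw [PySem.List.pyRange_one_eq_nil hle]
    simp only [List.foldl_nil]
    have hji : ((j:Nat).minFac : Int) < i := by
      have h1 : (j:Nat).minFac ≤ j := Nat.minFac_le (by omega)
      have h2 : (j : Int) < size := by omega
      have h3 : ((j:Nat).minFac : Int) ≤ (j : Int) := by exact_mod_cast h1
      omega
    rw [hinv j hj2 hjlen, if_pos hji]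
  | succ k ih =>
    intro i s hk hi hlen hinv j hj2 hjlen
    by_cases his : size ≤ i
    · rw [PySem.List.pyRange_one_eq_nil his]
      simp only [List.foldl_nil]
      have hji : ((j:Nat).minFac : Int) < i := by
        have h1 : (j:Nat).minFac ≤ j := Nat.minFac_le (by omega)
        have h3 : ((j:Nat).minFac : Int) ≤ (j : Int) := by exact_mod_cast h1
        omega
      rw [hinv j hj2 hjlen, if_pos hji]
    · have his' : i < size := by omega
      rw [PySem.List.pyRange_one_cons his']
      simp only [List.foldl_cons]
      have hilen : i.toNat < s.size := by omega
      have hicast : ((i.toNat : Nat) : Int) = i := Int.toNat_of_nonneg (by omega)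
      have hgi : spfGet s i = s.getD i.toNat 0 := rfl
      have hvi := hinv i.toNat (by omega) hilen
      by_cases hz : s.getD i.toNat 0 = 0
      · -- i is "unmarked": minFac i.toNat = i.toNat, so i is prime; mark its multiples
        have hnlt : ¬ (((i.toNat:Nat).minFac : Int) < i) := by
          intro hc
          rw [hvi, if_pos hc] at hz
          have h2 : 2 ≤ (i.toNat : Nat).minFac := (Nat.minFac_prime (by omega)).two_le
          omega
        have hmf : (i.toNat : Nat).minFac = i.toNat := by
          have h1 : (i.toNat : Nat).minFac ≤ i.toNat := Nat.minFac_le (by omega)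
          have h2 : ((i.toNat:Nat).minFac : Int) ≤ i := by omega
          omega
        have hcond : (spfGet s i == 0) = true := by rw [hgi, hz]; rfl
        rw [hcond, if_pos rfl]
        obtain ⟨m1, m2⟩ := markMultiples_getD i size s hi hlen
        apply ih (i + 1) (markMultiples i size s) (by omega) (by omega) (by rw [m1, hlen])
        · intro j' hj'2 hj'len
          rw [m1] at hj'len
          rw [m2 j' hj'len, hinv j' hj'2 hj'len]
          rcases lt_trichotomy (((j':Nat).minFac : Int)) i with hc | hc | hc
          · -- already holds its minFac; minFac ≥ 2 so not re-marked
            have hne : ¬ ((if ((j':Nat).minFac : Int) < i then ((j':Nat).minFac : Int) else 0)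
                = 0) := by
              rw [if_pos hc]
              have : 2 ≤ (j' : Nat).minFac := (Nat.minFac_prime (by omega)).two_le
              omega
            rw [if_neg (by rintro ⟨_, _, h3⟩; exact hne h3), if_pos hc, if_pos (by omega)]
          · -- minFac j' = i: cell is 0 and gets marked with i
            have h0 : (if ((j':Nat).minFac : Int) < i then ((j':Nat).minFac : Int) else 0)
                = 0 := by rw [if_neg (by omega)]
            have hdvd : i ∣ (j' : Int) := by
              have h1 : (j':Nat).minFac ∣ j' := Nat.minFac_dvd _
              have h2 : (((j':Nat).minFac : Nat) : Int) ∣ ((j' : Nat) : Int) :=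
                Int.natCast_dvd_natCast.mpr h1
              rwa [hc] at h2
            have hle' : i ≤ (j' : Int) := by
              have h1 : (j':Nat).minFac ≤ j' := Nat.minFac_le (by omega)
              have h2 : ((j':Nat).minFac : Int) ≤ (j' : Int) := by exact_mod_cast h1
              omega
            rw [h0, if_pos ⟨hdvd, hle', rfl⟩, if_pos (by omega)]
            omega
          · -- minFac j' > i: i does not divide j', cell stays 0
            have h0 : (if ((j':Nat).minFac : Int) < i then ((j':Nat).minFac : Int) else 0)
                = 0 := by rw [if_neg (by omega)]
            have hnd : ¬ (i ∣ (j' : Int)) := by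
              intro hdv
              have h1 : i.toNat ∣ j' := by
                have h2 : ((i.toNat : Nat) : Int) ∣ ((j' : Nat) : Int) := by rwa [hicast]
                exact_mod_cast h2
              have h2 : (j' : Nat).minFac ≤ i.toNat := Nat.minFac_le_of_dvd (by omega) h1
              have h3 : ((j' : Nat).minFac : Int) ≤ i := by omega
              omega
            rw [h0, if_neg (by rintro ⟨h1, _, _⟩; exact hnd h1), if_neg (by omega)]
        · omega
        · rwa [m1]
      · have hcond : (spfGet s i == 0) = false := by rw [hgi]; simpa using hz
        rw [hcond]
        simp only [Bool.false_eq_true, if_false]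
        -- i composite (its minFac is < i): no j' has minFac = i, invariant transfers
        have hlt : ((i.toNat:Nat).minFac : Int) < i := by
          by_contra hc
          rw [hvi, if_neg hc] at hz
          exact hz rfl
        apply ih (i + 1) s (by omega) (by omega) hlen
        · intro j' hj'2 hj'len
          rw [hinv j' hj'2 hj'len]
          rcases lt_trichotomy (((j':Nat).minFac : Int)) i with hc | hc | hc
          · rw [if_pos hc, if_pos (by omega)]
          · exfalso
            -- minFac j' = i would make i.toNat prime, but minFac i.toNat < i
            have hji : (j' : Nat).minFac = i.toNat := by omega
            have hp : Nat.Prime ((j' : Nat).minFac) := Nat.minFac_prime (by omega)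
            rw [hji] at hp
            have := Nat.prime_def_minFac.mp hp
            omega
          · rw [if_neg (by omega), if_neg (by omega)]
        · omega
        · exact hjlen

theorem buildSpf_getD (size : Int) : ∀ j : Nat, 2 ≤ j → (j : Int) < size →
    spfGet (buildSpf size) ((j : Nat) : Int) = ((j:Nat).minFac : Int) := by
  intro j hj2 hjs
  have hjlen : j < (Array.replicate size.toNat (0:Int)).size := by
    rw [Array.size_replicate]; omega
  show (buildSpf size).getD ((j : Int)).toNat 0 = ((j:Nat).minFac : Int)
  rw [show ((j : Int)).toNat = j by omega]
  rw [buildSpf]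
  apply buildAux size (size - 2).toNat 2 _ rfl (by omega) (by rw [Array.size_replicate])
  · intro j' hj'2 hj'len
    have : (Array.replicate size.toNat (0:Int)).getD j' 0 = 0 := by
      rw [arrGetD_eq _ _ _ hj'len, Array.getElem_replicate]
    rw [this, if_neg ?_]
    have h2 : 2 ≤ (j' : Nat).minFac := (Nat.minFac_prime (by omega)).two_le
    omega
  · exact hj2
  · exact hjlen

theorem bFactor_eq (size : Int) (spf : Array Int)
    (hget : ∀ j : Nat, 2 ≤ j → (j:Int) < size →
      spfGet spf ((j : Nat) : Int) = ((j:Nat).minFac : Int)) :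
    ∀ (k : Nat) (m cnt fsum : Int), m.toNat = k → 1 ≤ m → m < size →
    bFactor spf m cnt fsum =
      (cnt + ((m.toNat).primeFactorsList.length : Int),
        fsum + natListDS (m.toNat).primeFactorsList) := by
  intro k
  induction k using Nat.strong_induction_on with
  | _ k ih =>
    intro m cnt fsum hk h1 hsize
    rw [bFactor]
    by_cases hm1 : m = 1
    · subst hm1
      rw [dif_neg (by rintro ⟨hc, _⟩; omega)]
      simp [Nat.primeFactorsList_one, natListDS]
    · have hm2 : 2 ≤ m := by omega
      have hmcast : ((m.toNat : Nat) : Int) = m := Int.toNat_of_nonneg (by omega)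
      have hp : spfGet spf m = ((m.toNat : Nat).minFac : Int) := by
        have := hget m.toNat (by omega) (by omega)
        rwa [hmcast] at this
      have hprime : Nat.Prime ((m.toNat : Nat).minFac) := Nat.minFac_prime (by omega)
      have hp2 : 2 ≤ (m.toNat : Nat).minFac := hprime.two_le
      rw [dif_pos ⟨by omega, by rw [hp]; exact_mod_cast hp2⟩]
      have hfd : PySem.Int.floordiv m (spfGet spf m)
          = ((m.toNat / (m.toNat : Nat).minFac : Nat) : Int) := by
        rw [hp, ← hmcast]
        exact_mod_cast PySem.Int.floordiv_natCast m.toNat ((m.toNat : Nat).minFac)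
      have hqpos : 1 ≤ m.toNat / (m.toNat : Nat).minFac :=
        Nat.div_pos (Nat.minFac_le (by omega)) (by omega)
      have hqlt : m.toNat / (m.toNat : Nat).minFac < m.toNat :=
        Nat.div_lt_self (by omega) (by omega)
      have hrec := ih (m.toNat / (m.toNat : Nat).minFac) (by omega)
        ((m.toNat / (m.toNat : Nat).minFac : Nat) : Int) (cnt + 1)
        (fsum + bDS (spfGet spf m)) (by omega) (by exact_mod_cast hqpos)
        (by have : ((m.toNat / (m.toNat : Nat).minFac : Nat) : Int) ≤ m := by
              rw [← hmcast]; exact_mod_cast Nat.div_le_self _ _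
            omega)
      rw [hfd, hrec]
      obtain ⟨t, ht⟩ : ∃ t, m.toNat = t + 2 := ⟨m.toNat - 2, by omega⟩
      rw [show ((m.toNat / (m.toNat : Nat).minFac : Nat) : Int).toNat
            = m.toNat / (m.toNat : Nat).minFac from by omega]
      conv_rhs => rw [ht, Nat.primeFactorsList_add_two]
      simp only [List.length_cons, natListDS, List.map_cons, List.sum_cons, hp, ht]
      simp only [Prod.mk.injEq]
      constructor
      · push_cast; ring
      · ring

-- ===== the per-candidate Smith tests agree =====

theorem smith_eq (size n : Int) (spf : Array Int)
    (hget : ∀ j : Nat, 2 ≤ j → (j:Int) < size →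
      spfGet spf ((j : Nat) : Int) = ((j:Nat).minFac : Int))
    (hn : 2 ≤ n) (hsize : n < size) :
    is_smith_number n
      = (decide (1 < (bFactor spf n 0 0).1) && ((bFactor spf n 0 0).2 == bDS n)) := by
  obtain ⟨h1, h2, h3, h4⟩ := aOuter_facts n 2 (by omega) (by omega)
    (by intro e he hlt; omega)
  rw [bFactor_eq size spf hget n.toNat n 0 0 rfl (by omega) hsize]
  set r := aOuter n 2 with hr
  set factors := if 1 < r.1 then r.2 ++ [r.1] else r.2 with hfactors
  -- factors is a list of primes with product n
  have hfact : (∀ x ∈ factors, 2 ≤ x ∧ Nat.Prime x.toNat) ∧ factors.prod = n := by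
    rw [hfactors]
    by_cases hcase : 1 < r.1
    · rw [if_pos hcase]
      constructor
      · intro x hx
        rw [List.mem_append] at hx
        rcases hx with hx | hx
        · exact h3 x hx
        · simp only [List.mem_singleton] at hx
          subst hx
          exact ⟨by omega, h4 hcase⟩
      · rw [List.prod_append, List.prod_singleton, mul_comm]
        exact h2
    · rw [if_neg hcase]
      have hr1 : r.1 = 1 := by omega
      exact ⟨h3, by rw [hr1, one_mul] at h2; exact h2⟩
  have hnonneg : ∀ x ∈ factors, (0:Int) ≤ x := fun x hx => by
    have := (hfact.1 x hx).1; omega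
  -- its Nat image is a permutation of n.toNat.primeFactorsList
  set lN := factors.map Int.toNat with hlN
  have hcastback : lN.map (Nat.cast : Nat → Int) = factors := map_toNat_cast factors hnonneg
  have hprodN : lN.prod = n.toNat := by
    have hcast : ((lN.prod : Nat) : Int) = n := by
      rw [Nat.cast_list_prod, hcastback, hfact.2]
    omega
  have hprimesN : ∀ p ∈ lN, Nat.Prime p := by
    intro p hp
    rw [hlN, List.mem_map] at hp
    obtain ⟨x, hx, rfl⟩ := hp
    exact (hfact.1 x hx).2
  have hperm : lN.Perm (n.toNat).primeFactorsList :=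
    Nat.primeFactorsList_unique hprodN hprimesN
  have hlen : factors.length = (n.toNat).primeFactorsList.length := by
    rw [← hperm.length_eq, hlN, List.length_map]
  have hsum : listDS factors = natListDS (n.toNat).primeFactorsList := by
    rw [listDS_eq_natListDS factors hnonneg, ← hlN, natListDS, natListDS]
    exact (hperm.map _).sum_eq
  -- factors is nonempty (its product is n ≥ 2)
  have hne : factors ≠ [] := by
    intro hc
    rw [hc] at hfact
    simp at hfact
    omega
  have hlen1 : 1 ≤ factors.length := List.length_pos_of_ne_nil hne
  rw [is_smith_number]
  simp only [← hr, ← hfactors]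
  rw [afold_eq factors 0 hnonneg, aDigitStep_eq, csum_toChars n (by omega),
    ← bDS_eq_natDS n (by omega)]
  by_cases hone : factors.length = 1
  · have hc1 : (factors.length == 1) = true := by simp [hone]
    rw [if_pos hc1]
    have hl1 : (n.toNat).primeFactorsList.length = 1 := by omega
    simp [hl1]
  · rw [if_neg (by simp [hone])]
    have hgt : (1 : Int) < ((n.toNat).primeFactorsList.length : Int) := by
      have h5 : 2 ≤ factors.length := by omega
      rw [hlen] at h5
      exact_mod_cast h5
    simp only [zero_add, hsum, decide_eq_true hgt, Bool.true_and]

-- ===== the enumeration loops agree step by step =====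

theorem loop_eq (limit : Int) : ∀ (f : Nat) (n size : Int) (acc : List Int),
    2 ≤ n → n ≤ size →
    aLoop limit f n acc = bLoop limit f n size (buildSpf size) acc := by
  intro f
  induction f with
  | zero => intro n size acc _ _; rfl
  | succ f ih =>
    intro n size acc hn hns
    rw [aLoop, bLoop]
    by_cases hlt : (acc.length : Int) < limit
    · rw [if_pos hlt, if_pos hlt]
      simp only
      by_cases hd : size ≤ n
      · have hneq : n = size := by omega
        rw [if_pos hd, if_pos hd]
        have hns' : n < size * 2 := by omega
        have hsm := smith_eq (size * 2) n (buildSpf (size * 2))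
          (buildSpf_getD (size * 2)) hn hns'
        rw [← hsm]
        exact ih (n + 1) (size * 2) _ (by omega) (by omega)
      · rw [if_neg hd, if_neg hd]
        have hns' : n < size := by omega
        have hsm := smith_eq size n (buildSpf size)
          (buildSpf_getD size) hn hns'
        rw [← hsm]
        exact ih (n + 1) size _ (by omega) (by omega)
    · rw [if_neg hlt, if_neg hlt]

-- ===== VERDICT (by name: the statement is the Claim_ definition above) =====
theorem enumerate_smith_numbers_spec : Claim_equal_enumerate_smith_numbers := by
  intro limit _
  show _ = _
  unfold enumerate_smith_numbers enumerate_smith_numbers_alt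
  exact loop_eq limit _ 4 64 [] (by omega) (by omega)
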